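-- pv_equiv track=rewrite | github.com/NeXT726/TEST | python/local-search.py | get_best_neighbor
-- ===== SOURCE A (Python) =====
-- def get_conflict_num(status):
-- 	conflict_num = 0
-- 	for c1 in range(0, 7):
-- 		for c2 in range(c1+1, 8):
-- 			if (status[c1] == status[c2]) or ((c2 - c1) == abs(status[c1] - status[c2])) :
-- 				conflict_num += 1
-- 	return conflict_num
--
-- def get_best_neighbor(status):
-- 	min_status = status
-- 	for c in range(0,8):
-- 		for r in range(0, 8):
-- 			new_status = status[:]
-- 			if status[c] != r:
-- 				new_status[c] = r
-- 				if get_conflict_num(new_status) < get_conflict_num(min_status):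
-- 					min_status = new_status
-- 				elif get_conflict_num(new_status) == get_conflict_num(min_status) and get_conflict_num(new_status) != get_conflict_num(status):
-- 					min_status = new_status
-- 	return min_status
-- ===== SOURCE B (Python) =====
-- def get_conflict_num(status):
-- 	conflict_num = 0
-- 	for c1 in range(0, 7):
-- 		for c2 in range(c1+1, 8):
-- 			if (status[c1] == status[c2]) or ((c2 - c1) == abs(status[c1] - status[c2])) :
-- 				conflict_num += 1
-- 	return conflict_num
--
-- def get_best_neighbor(status):
-- 	s_conf = get_conflict_num(status)
-- 	table = []
-- 	for c in range(0, 8):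
-- 		for r in range(0, 8):
-- 			if status[c] != r:
-- 				ns = status[:]
-- 				ns[c] = r
-- 				table.append((c, r, get_conflict_num(ns)))
-- 	m = min(conf for (_, _, conf) in table)
-- 	if m < s_conf:
-- 		best = None
-- 		for (c, r, conf) in table:
-- 			if conf == m:
-- 				best = (c, r)
-- 		(c, r) = best
-- 		ns = status[:]
-- 		ns[c] = r
-- 		return ns
-- 	return status
-- ===== Notes on version B (the rewrite author's own statement) =====
-- stated objective: alternative
-- what changed: A's single scan with an evolving minimum (re-evaluating get_conflict_num on the current minimum and the original board at every move) is replaced by one table-building pass that evaluates each neighbor's conflict count exactly once, followed by separate min and last-argmin selection passes.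
import Mathlib
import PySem

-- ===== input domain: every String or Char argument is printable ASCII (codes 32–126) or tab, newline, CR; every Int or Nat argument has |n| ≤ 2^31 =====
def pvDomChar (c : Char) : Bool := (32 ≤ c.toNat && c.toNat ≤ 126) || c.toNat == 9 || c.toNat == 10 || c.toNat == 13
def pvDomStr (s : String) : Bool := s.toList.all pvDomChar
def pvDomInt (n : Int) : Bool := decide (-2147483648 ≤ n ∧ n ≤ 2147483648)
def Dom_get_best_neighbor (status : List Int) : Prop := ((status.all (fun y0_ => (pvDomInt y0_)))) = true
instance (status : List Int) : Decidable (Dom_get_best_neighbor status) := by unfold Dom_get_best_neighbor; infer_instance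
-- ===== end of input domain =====

-- B replaces A's single evolving-minimum scan (3 conflict evaluations per move) by one
-- table-building pass (one conflict evaluation per move) followed by separate min and
-- last-argmin selection passes: a different decomposition of the same search.

-- ===== PORT A =====
-- helper get_conflict_num, shared module context of both Pythons; all indices used are 0..7,
-- in range under Pre_ (length ≥ 8), where pyGetD/pySetD are exact (Pre_ excludes the
-- IndexError inputs).
def get_conflict_num (status : List Int) : Int :=
  (PySem.List.pyRange 0 7 1).foldl (fun acc c1 =>
    (PySem.List.pyRange (c1 + 1) 8 1).foldl (fun acc c2 =>
      if PySem.List.pyGetD status c1 0 = PySem.List.pyGetD status c2 0 ∨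
         c2 - c1 = |PySem.List.pyGetD status c1 0 - PySem.List.pyGetD status c2 0| then
        acc + 1
      else acc) acc) 0
def get_best_neighbor (status : List Int) : List Int :=
  (PySem.List.pyRange 0 8 1).foldl (fun min_status c =>
    (PySem.List.pyRange 0 8 1).foldl (fun min_status r =>
      if PySem.List.pyGetD status c 0 ≠ r then
        let new_status := PySem.List.pySetD status c r
        if get_conflict_num new_status < get_conflict_num min_status then new_status
        else if get_conflict_num new_status = get_conflict_num min_status ∧
                get_conflict_num new_status ≠ get_conflict_num status then new_status
        else min_status
      else min_status) min_status) status
-- ===== PORT B =====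
def get_best_neighbor_alt (status : List Int) : List Int :=
  let s_conf := get_conflict_num status
  let table :=
    (PySem.List.pyRange 0 8 1).foldl (fun tb c =>
      (PySem.List.pyRange 0 8 1).foldl (fun tb r =>
        if PySem.List.pyGetD status c 0 ≠ r then
          tb ++ [(c, r, get_conflict_num (PySem.List.pySetD status c r))]
        else tb) tb) []
  match PySem.List.min? (table.map (fun t => t.2.2)) id with
  | none => status
  | some m =>
    if m < s_conf then
      match table.foldl (fun best t => if t.2.2 = m then some (t.1, t.2.1) else best)
          (none : Option (Int × Int)) with
      | none => status
      | some cr => PySem.List.pySetD status cr.1 cr.2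
    else status

-- ===== PRECONDITION & SPEC =====
-- Pre_ excludes exactly the inputs on which the Python A raises IndexError (fewer than 8 queens).
def Pre_get_best_neighbor (status : List Int) : Prop := 8 ≤ status.length
instance (status : List Int) : Decidable (Pre_get_best_neighbor status) := by
  unfold Pre_get_best_neighbor; infer_instance

def pvWitness_get_best_neighbor : List Int := [0, 1, 2, 3, 4, 5, 6, 7]

def Spec_get_best_neighbor (status : List Int) (out : List Int) : Prop :=
  out = get_best_neighbor_alt status
instance (status : List Int) (out : List Int) : Decidable (Spec_get_best_neighbor status out) := by
  unfold Spec_get_best_neighbor; infer_instance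

-- ===== CLAIM (what is proved, stated in full; the proofs are below) =====
def Claim_equal_get_best_neighbor : Prop :=
  ∀ (status : List Int), Dom_get_best_neighbor status → Pre_get_best_neighbor status →
    Spec_get_best_neighbor status (get_best_neighbor status)

-- ===== LEMMAS AND PROOFS =====
def pvPairs : List (Int × Int) :=
  (PySem.List.pyRange 0 8 1).flatMap (fun c => (PySem.List.pyRange 0 8 1).map (fun r => (c, r)))
def pvMoves (status : List Int) : List (Int × Int) :=
  pvPairs.filter (fun p => decide (PySem.List.pyGetD status p.1 0 ≠ p.2))
def pvApply (status : List Int) (p : Int × Int) : List Int :=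
  PySem.List.pySetD status p.1 p.2
def pvConf (status : List Int) (p : Int × Int) : Int :=
  get_conflict_num (pvApply status p)
def pvStepA (status : List Int) (ms : List Int) (p : Int × Int) : List Int :=
  if pvConf status p < get_conflict_num ms then pvApply status p
  else if pvConf status p = get_conflict_num ms ∧
          pvConf status p ≠ get_conflict_num status then pvApply status p
  else ms
theorem pv_nested_fold_eq {β : Type} (g : β → Int × Int → β) (init : β) :
    (PySem.List.pyRange 0 8 1).foldl (fun st c =>
      (PySem.List.pyRange 0 8 1).foldl (fun st r => g st (c, r)) st) init
    = pvPairs.foldl g init := by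
  simp only [pvPairs, show PySem.List.pyRange 0 8 1 = [0,1,2,3,4,5,6,7] from by decide]
  rfl
theorem pv_A_as_moves (status : List Int) :
    get_best_neighbor status = (pvMoves status).foldl (pvStepA status) status := by
  unfold get_best_neighbor
  rw [pvMoves, List.foldl_filter, ← pv_nested_fold_eq]
  simp only [decide_eq_true_eq]
  rfl
theorem pv_B_table (status : List Int) :
    (PySem.List.pyRange 0 8 1).foldl (fun tb c =>
      (PySem.List.pyRange 0 8 1).foldl (fun tb r =>
        if PySem.List.pyGetD status c 0 ≠ r then
          tb ++ [(c, r, get_conflict_num (PySem.List.pySetD status c r))]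
        else tb) tb) []
    = (pvMoves status).map (fun p => (p.1, p.2, pvConf status p)) := by
  have h1 : (PySem.List.pyRange 0 8 1).foldl (fun tb c =>
      (PySem.List.pyRange 0 8 1).foldl (fun tb r =>
        if PySem.List.pyGetD status c 0 ≠ r then
          tb ++ [(c, r, get_conflict_num (PySem.List.pySetD status c r))]
        else tb) tb) ([] : List (Int × Int × Int))
      = pvPairs.foldl (fun tb p =>
          if decide (PySem.List.pyGetD status p.1 0 ≠ p.2) = true then
            tb ++ [(p.1, p.2, pvConf status p)] else tb) [] := by
    rw [← pv_nested_fold_eq]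
    simp only [decide_eq_true_eq]
    rfl
  rw [h1, ← List.foldl_filter, PySem.List.foldl_append_singleton_eq_map, List.nil_append, pvMoves]
def pvStepO (status : List Int) (o : Option (Int × Int)) (p : Int × Int) : Option (Int × Int) :=
  match o with
  | none => if pvConf status p < get_conflict_num status then some p else none
  | some q => if pvConf status p ≤ pvConf status q then some p else some q
def pvRender (status : List Int) (o : Option (Int × Int)) : List Int :=
  match o with
  | none => status
  | some p => pvApply status p
def pvLastEq (status : List Int) (L : List (Int × Int)) (m : Int) : Option (Int × Int) :=
  L.foldl (fun b p => if pvConf status p = m then some p else b) none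
def pvORes (status : List Int) (L : List (Int × Int)) : Option (Int × Int) :=
  match PySem.List.min? (L.map (pvConf status)) id with
  | none => none
  | some m => if m < get_conflict_num status then pvLastEq status L m else none

theorem pv_fold_render (status : List Int) (L : List (Int × Int)) (o : Option (Int × Int))
    (ho : ∀ q, o = some q → pvConf status q < get_conflict_num status) :
    L.foldl (pvStepA status) (pvRender status o) = pvRender status (L.foldl (pvStepO status) o) := by
  induction L generalizing o with
  | nil => rfl
  | cons p L ih =>
    have hstep : pvStepA status (pvRender status o) p = pvRender status (pvStepO status o p) := by
      rcases o with _ | q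
      · simp only [pvRender, pvStepA, pvStepO]
        by_cases h1 : pvConf status p < get_conflict_num status
        · rw [if_pos h1, if_pos h1]
        · rw [if_neg h1, if_neg h1, if_neg (fun hc => hc.2 hc.1)]
      · have hq := ho q rfl
        simp only [pvRender, pvStepA, pvStepO, pvConf] at hq ⊢
        rcases lt_trichotomy (get_conflict_num (pvApply status p))
          (get_conflict_num (pvApply status q)) with h | h | h
        · rw [if_pos h, if_pos (le_of_lt h)]
        · rw [if_neg (by omega), if_pos ⟨h, by omega⟩, if_pos (by omega)]
        · rw [if_neg (by omega), if_neg (by omega), if_neg (by omega)]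
    have ho' : ∀ q, pvStepO status o p = some q → pvConf status q < get_conflict_num status := by
      intro q' hq'
      rcases o with _ | q
      · simp only [pvStepO] at hq'
        split_ifs at hq' with h
        · cases hq'; exact h
      · have hq := ho q rfl
        simp only [pvStepO] at hq'
        split_ifs at hq' with h <;> cases hq'
        · simp only [pvConf] at h hq ⊢; omega
        · exact hq
    rw [List.foldl_cons, List.foldl_cons, hstep, ih _ ho']

theorem pv_lastEq_append (status : List Int) (L : List (Int × Int)) (p : Int × Int) (m : Int) :
    pvLastEq status (L ++ [p]) m
    = if pvConf status p = m then some p else pvLastEq status L m := by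
  simp only [pvLastEq, List.foldl_append, List.foldl_cons, List.foldl_nil]

theorem pv_lastEq_spec (status : List Int) (L : List (Int × Int)) (m : Int)
    (h : ∃ p ∈ L, pvConf status p = m) :
    ∃ q, pvLastEq status L m = some q ∧ pvConf status q = m := by
  induction L using List.reverseRecOn with
  | nil => simp at h
  | append_singleton L p ih =>
    rw [pv_lastEq_append]
    by_cases hp : pvConf status p = m
    · exact ⟨p, by simp [hp], hp⟩
    · simp only [if_neg hp]
      apply ih
      rcases h with ⟨q, hq, hqm⟩
      rcases List.mem_append.1 hq with h' | h'
      · exact ⟨q, h', hqm⟩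
      · simp at h'; subst h'; exact absurd hqm hp

theorem pv_min?_append_some (f : (Int × Int) → Int) (L : List (Int × Int)) (p : Int × Int)
    (m : Int) (h : PySem.List.min? (L.map f) id = some m) :
    PySem.List.min? ((L ++ [p]).map f) id
      = if f p < m then some (f p) else some m := by
  simp only [PySem.List.min?] at h
  simp only [PySem.List.min?, List.map_append, List.foldl_append, h]
  rfl

theorem pv_fold_stepO (status : List Int) (L : List (Int × Int)) :
    L.foldl (pvStepO status) none = pvORes status L := by
  induction L using List.reverseRecOn with
  | nil => rfl
  | append_singleton L p ih =>
    rw [List.foldl_append, List.foldl_cons, List.foldl_nil, ih]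
    rcases hM : PySem.List.min? (L.map (pvConf status)) id with _ | m
    · have hL : L = [] := List.map_eq_nil_iff.mp ((PySem.List.min?_eq_none_iff _ _).mp hM)
      subst hL
      simp only [pvORes, hM, List.nil_append, pvStepO]
      by_cases h : pvConf status p < get_conflict_num status
      · simp [pvLastEq, PySem.List.min?, h]
      · simp [PySem.List.min?, h]
    · obtain ⟨q, hq, hfq⟩ : ∃ q, pvLastEq status L m = some q ∧ pvConf status q = m := by
        apply pv_lastEq_spec
        obtain ⟨q, hq', hfq'⟩ := List.mem_map.mp (PySem.List.min?_mem hM)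
        exact ⟨q, hq', hfq'⟩
      by_cases hms : m < get_conflict_num status
      · rcases lt_trichotomy (pvConf status p) m with h | h | h
        · have hmin := pv_min?_append_some (pvConf status) L p m hM
          rw [if_pos h] at hmin
          simp only [pvORes, hM, if_pos hms, hq, pvStepO, hfq, hmin, pv_lastEq_append]
          rw [if_pos (le_of_lt h), if_pos (by omega)]
          simp
        · have hmin := pv_min?_append_some (pvConf status) L p m hM
          rw [if_neg (by omega)] at hmin
          simp only [pvORes, hM, if_pos hms, hq, pvStepO, hfq, hmin, pv_lastEq_append]
          rw [if_pos (le_of_eq h), if_pos h]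
        · have hmin := pv_min?_append_some (pvConf status) L p m hM
          rw [if_neg (by omega)] at hmin
          simp only [pvORes, hM, if_pos hms, hq, pvStepO, hfq, hmin, pv_lastEq_append]
          rw [if_neg (by omega), if_neg (by omega)]
      · simp only [pvORes, hM, if_neg hms, pvStepO]
        by_cases hp : pvConf status p < get_conflict_num status
        · have hmin := pv_min?_append_some (pvConf status) L p m hM
          rw [if_pos (by omega)] at hmin
          simp only [hmin, pv_lastEq_append]
          rw [if_pos hp, if_pos hp]
          simp
        · rcases lt_trichotomy (pvConf status p) m with h | h | h
          · have hmin := pv_min?_append_some (pvConf status) L p m hM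
            rw [if_pos h] at hmin
            simp only [hmin, pv_lastEq_append]
            rw [if_neg hp, if_neg hp]
          · have hmin := pv_min?_append_some (pvConf status) L p m hM
            rw [if_neg (by omega)] at hmin
            simp only [hmin]
            rw [if_neg hp, if_neg hms]
          · have hmin := pv_min?_append_some (pvConf status) L p m hM
            rw [if_neg (by omega)] at hmin
            simp only [hmin]
            rw [if_neg hp, if_neg hms]

theorem pv_B_eq (status : List Int) :
    get_best_neighbor_alt status = pvRender status (pvORes status (pvMoves status)) := by
  simp only [get_best_neighbor_alt]
  rw [pv_B_table]
  have hmap : ((pvMoves status).map (fun p => (p.1, p.2, pvConf status p))).map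
      (fun t => t.2.2) = (pvMoves status).map (pvConf status) := by
    rw [List.map_map]; rfl
  have hsel : ∀ m : Int, ((pvMoves status).map (fun p => (p.1, p.2, pvConf status p))).foldl
      (fun best t => if t.2.2 = m then some (t.1, t.2.1) else best)
      (none : Option (Int × Int)) = pvLastEq status (pvMoves status) m := by
    intro m
    rw [List.foldl_map]
    rfl
  rw [hmap]
  rcases hM : PySem.List.min? ((pvMoves status).map (pvConf status)) id with _ | m
  · simp only [pvORes, hM, pvRender]
  · by_cases hms : m < get_conflict_num status
    · obtain ⟨q, hq, hfq⟩ : ∃ q, pvLastEq status (pvMoves status) m = some q ∧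
          pvConf status q = m := by
        apply pv_lastEq_spec
        obtain ⟨q, hq', hfq'⟩ := List.mem_map.mp (PySem.List.min?_mem hM)
        exact ⟨q, hq', hfq'⟩
      simp only [pvORes, hM, if_pos hms, hsel, hq, pvRender, pvApply]
    · simp only [pvORes, hM, if_neg hms, pvRender]

theorem pv_main (status : List Int) : get_best_neighbor status = get_best_neighbor_alt status := by
  rw [pv_B_eq, ← pv_fold_stepO, pv_A_as_moves]
  exact pv_fold_render status (pvMoves status) none (fun q h => by cases h)

-- ===== VERDICT (by name: the statement is the Claim_ definition above) =====
theorem get_best_neighbor_spec : Claim_equal_get_best_neighbor := by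
  intro status _ _
  unfold Spec_get_best_neighbor
  exact pv_main status
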